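-- pv_equiv track=rewrite | github.com/ermmy-coder/Hete_MESE-python | Hete_MESE1.py | seed_expansion
-- ===== SOURCE A (Python) =====
-- def get_neighbors(node, adj):
--     """通过邻接表快速查询邻居"""
--     return list(adj.get(node, set()))
--
-- def seed_expansion(hetero_graph, seed_communities, central_node_type,adjacency_list):
--     """
--     将种子社区扩展到其他节点类型
--     :param hetero_graph: 异构网络
--     :param seed_communities: 种子社区列表
--     :param central_node_type: 中心节点类型
--     :return: 异构社区列表 [{'authors': [], 'papers': [], ...}, ...]
--     """
--     final_communities = []
--     for seed in seed_communities:
--         community = {central_node_type: set(seed)}#为当前正在扩展的种子社区创建一个空容器，用于存储该社区内所有类型的节点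
--         # 初始化其他节点类型
--         for node_type in hetero_graph.keys():
--             if node_type != central_node_type:#跳过中心节点
--                 community[node_type] = set()#初始化其他类型节点的社区为空社区
--
--         # 扩展非中心节点（公式4）
--         for node_type, nodes in hetero_graph.items():#nodes是某个类型对应的所有节点集合
--             if node_type == central_node_type:#跳过中心节点
--                 continue
--             for node in nodes:#非中心节点的某种类型节点的每一个节点
--                 max_sim = -1
--                 best_seeds = []
--                 for seed_node in seed:#某个种子社区的每个节点
--                     # 计算相似度（简化版：直接统计共同邻居）
--                     neighbors = set(get_neighbors(seed_node,adjacency_list))  # 需实现get_neighbors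
--                     sim = len(neighbors & set(get_neighbors(node,adjacency_list)))
--                     if sim > max_sim:
--                         max_sim = sim
--                         best_seeds = [seed_node]
--                     elif sim == max_sim:
--                         best_seeds.append(seed_node) #找到和该节点相似值最大的种子节点并加入到best_seeds的队列中
--                 if max_sim > 0:
--                     community[node_type].add(node)#如果最大相似度大于0了，就将该节点归入到该类型节点的社区中
--
--         final_communities.append(community)
--     return final_communities
-- ===== SOURCE B (Python) =====
-- def seed_expansion(hetero_graph, seed_communities, central_node_type, adjacency_list):
--     final_communities = []
--     for seed in seed_communities:
--         # union of the neighbors of all seed nodes, computed once per community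
--         seed_nbrs = set()
--         for s in seed:
--             seed_nbrs.update(adjacency_list.get(s, ()))
--         community = {central_node_type: set(seed)}
--         for node_type, nodes in hetero_graph.items():
--             if node_type != central_node_type:
--                 community[node_type] = set(
--                     n for n in nodes
--                     if not seed_nbrs.isdisjoint(adjacency_list.get(n, ()))
--                 )
--         final_communities.append(community)
--     return final_communities
-- ===== Notes on version B (the rewrite author's own statement) =====
-- stated objective: faster
-- what changed: Instead of scoring every (node, seed_node) pair by building and intersecting neighbor sets to find a max-similarity seed (whose best_seeds result is discarded anyway), B computes the union of the seed nodes' neighbors once per community and admits a node iff its neighbor list is not disjoint from that union.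
import Mathlib
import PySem

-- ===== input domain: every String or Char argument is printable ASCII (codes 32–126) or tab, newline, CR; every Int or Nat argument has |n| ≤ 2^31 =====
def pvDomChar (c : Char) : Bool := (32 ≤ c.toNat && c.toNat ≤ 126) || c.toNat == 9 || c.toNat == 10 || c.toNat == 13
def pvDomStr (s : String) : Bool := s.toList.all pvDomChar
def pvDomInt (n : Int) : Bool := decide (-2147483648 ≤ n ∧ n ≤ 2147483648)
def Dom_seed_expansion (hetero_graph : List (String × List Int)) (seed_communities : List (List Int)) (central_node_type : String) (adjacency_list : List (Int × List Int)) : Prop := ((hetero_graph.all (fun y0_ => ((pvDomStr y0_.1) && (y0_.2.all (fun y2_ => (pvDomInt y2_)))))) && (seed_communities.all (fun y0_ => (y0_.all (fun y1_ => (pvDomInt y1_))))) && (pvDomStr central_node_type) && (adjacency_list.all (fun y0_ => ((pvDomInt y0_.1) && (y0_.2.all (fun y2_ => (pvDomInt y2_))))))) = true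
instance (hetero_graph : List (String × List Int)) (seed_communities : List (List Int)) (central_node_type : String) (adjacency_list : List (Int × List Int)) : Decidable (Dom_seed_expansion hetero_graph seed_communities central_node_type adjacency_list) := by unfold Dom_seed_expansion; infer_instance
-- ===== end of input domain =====

-- B computes each community's union of seed-node neighbors once and admits a node iff its
-- neighbor list meets that union, replacing A's per-(node, seed_node) set intersections
-- (A's max-similarity bookkeeping never influences the returned communities).

-- ===== PORT A =====
-- list(adj.get(node, set())) : the stored value is a list, so this is getD
def get_neighbors (node : Int) (adj : PySem.Dict Int (List Int)) : List Int :=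
  adj.getD node []

-- the inner 'for seed_node in seed' loop of A: state (max_sim, best_seeds)
def pvA_best (seed : List Int) (adj : PySem.Dict Int (List Int)) (node : Int) : Int × List Int :=
  seed.foldl (fun st seed_node =>
    let neighbors := PySem.Set.ofList (get_neighbors seed_node adj)
    let sim : Int := PySem.Set.len (PySem.Set.inter neighbors (PySem.Set.ofList (get_neighbors node adj)))
    if st.1 < sim then (sim, [seed_node])
    else if sim = st.1 then (st.1, st.2 ++ [seed_node])
    else st) (-1, [])

-- one iteration of A's outer 'for seed in seed_communities' loop (builds one community dict)
def pvA_community (hgd : PySem.Dict String (List Int)) (adj : PySem.Dict Int (List Int))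
    (central_node_type : String) (seed : List Int) : PySem.Dict String (PySem.Set Int) :=
  let community : PySem.Dict String (PySem.Set Int) :=
    PySem.Dict.empty.insert central_node_type (PySem.Set.ofList seed)
  let community := hgd.keys.foldl (fun c node_type =>
    if node_type ≠ central_node_type then c.insert node_type PySem.Set.empty else c) community
  hgd.items.foldl (fun c p =>
    if p.1 = central_node_type then c
    else p.2.foldl (fun c node =>
      if 0 < (pvA_best seed adj node).1 then
        c.modify p.1 PySem.Set.empty (fun s => PySem.Set.add s node)
      else c) c)
    community

def seed_expansion (hetero_graph : List (String × List Int)) (seed_communities : List (List Int)) (central_node_type : String) (adjacency_list : List (Int × List Int)) : List (List (String × List Int)) :=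
  let hgd := PySem.Dict.ofList hetero_graph
  let adjd := PySem.Dict.ofList adjacency_list
  seed_communities.foldl (fun acc seed =>
    acc ++ [(pvA_community hgd adjd central_node_type seed).items]) []

-- ===== PORT B =====
def pvB_seed_nbrs (adj : PySem.Dict Int (List Int)) (seed : List Int) : PySem.Set Int :=
  seed.foldl (fun s n => PySem.Set.update s (adj.getD n [])) PySem.Set.empty

def pvB_community (hgd : PySem.Dict String (List Int)) (adj : PySem.Dict Int (List Int))
    (central_node_type : String) (seed : List Int) : PySem.Dict String (PySem.Set Int) :=
  let seed_nbrs := pvB_seed_nbrs adj seed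
  hgd.items.foldl (fun c p =>
    if p.1 = central_node_type then c
    else c.insert p.1 (PySem.Set.ofList (p.2.filter (fun n =>
      !(PySem.Set.isdisjoint seed_nbrs (adj.getD n []))))))
    (PySem.Dict.empty.insert central_node_type (PySem.Set.ofList seed))

def seed_expansion_alt (hetero_graph : List (String × List Int)) (seed_communities : List (List Int)) (central_node_type : String) (adjacency_list : List (Int × List Int)) : List (List (String × List Int)) :=
  let hgd := PySem.Dict.ofList hetero_graph
  let adjd := PySem.Dict.ofList adjacency_list
  seed_communities.map (fun seed => (pvB_community hgd adjd central_node_type seed).items)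

-- ===== PRECONDITION & SPEC =====
def Spec_seed_expansion (hetero_graph : List (String × List Int)) (seed_communities : List (List Int)) (central_node_type : String) (adjacency_list : List (Int × List Int)) (out : List (List (String × List Int))) : Prop := out = seed_expansion_alt hetero_graph seed_communities central_node_type adjacency_list
instance (hetero_graph : List (String × List Int)) (seed_communities : List (List Int)) (central_node_type : String) (adjacency_list : List (Int × List Int)) (out : List (List (String × List Int))) : Decidable (Spec_seed_expansion hetero_graph seed_communities central_node_type adjacency_list out) := by unfold Spec_seed_expansion; infer_instance

-- ===== CLAIM (what is proved, stated in full; the proofs are below) =====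
def Claim_equal_seed_expansion : Prop := ∀ (hetero_graph : List (String × List Int)) (seed_communities : List (List Int)) (central_node_type : String) (adjacency_list : List (Int × List Int)), Dom_seed_expansion hetero_graph seed_communities central_node_type adjacency_list → Spec_seed_expansion hetero_graph seed_communities central_node_type adjacency_list (seed_expansion hetero_graph seed_communities central_node_type adjacency_list)

-- ===== LEMMAS AND PROOFS =====

-- A's running maximum: the first component of pvA_best is a foldl of max
theorem foldl_best_fst (seed : List Int) (adj : PySem.Dict Int (List Int)) (node : Int) :
    ∀ st : Int × List Int,
    (seed.foldl (fun st seed_node =>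
      let neighbors := PySem.Set.ofList (get_neighbors seed_node adj)
      let sim : Int := PySem.Set.len (PySem.Set.inter neighbors (PySem.Set.ofList (get_neighbors node adj)))
      if st.1 < sim then (sim, [seed_node])
      else if sim = st.1 then (st.1, st.2 ++ [seed_node])
      else st) st).1 =
      seed.foldl (fun m s => max m (PySem.Set.len (PySem.Set.inter
        (PySem.Set.ofList (get_neighbors s adj))
        (PySem.Set.ofList (get_neighbors node adj))))) st.1 := by
  induction seed with
  | nil => intro st; rfl
  | cons a t ih =>
    intro st
    simp only [List.foldl_cons]
    rw [ih]
    congr 1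
    split_ifs with h1 h2
    · exact (max_eq_right h1.le).symm
    · rw [h2, max_self]
    · exact (max_eq_left (le_of_not_gt h1)).symm

theorem pvA_best_fst (seed : List Int) (adj : PySem.Dict Int (List Int)) (node : Int) :
    (pvA_best seed adj node).1 =
      seed.foldl (fun m s => max m (PySem.Set.len (PySem.Set.inter
        (PySem.Set.ofList (get_neighbors s adj))
        (PySem.Set.ofList (get_neighbors node adj))))) (-1) := by
  exact foldl_best_fst seed adj node (-1, [])

theorem mem_pvB_seed_nbrs (adj : PySem.Dict Int (List Int)) (seed : List Int) (x : Int) :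
    x ∈ pvB_seed_nbrs adj seed ↔ ∃ s ∈ seed, x ∈ adj.getD s [] := by
  unfold pvB_seed_nbrs
  have : ∀ (l : List Int) (acc : PySem.Set Int),
      x ∈ l.foldl (fun s n => PySem.Set.update s (adj.getD n [])) acc ↔
        x ∈ acc ∨ ∃ s ∈ l, x ∈ adj.getD s [] := by
    intro l
    induction l with
    | nil => simp
    | cons a t ih =>
      intro acc
      simp only [List.foldl_cons, ih, PySem.Set.mem_update, List.mem_cons]
      constructor
      · rintro ((h | h) | ⟨s, hs, h⟩)
        · exact Or.inl h
        · exact Or.inr ⟨a, Or.inl rfl, h⟩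
        · exact Or.inr ⟨s, Or.inr hs, h⟩
      · rintro (h | ⟨s, rfl | hs, h⟩)
        · exact Or.inl (Or.inl h)
        · exact Or.inl (Or.inr h)
        · exact Or.inr ⟨s, hs, h⟩
  simp [this, PySem.Set.empty]

-- positivity of a foldl-max
theorem foldl_max_pos {α : Type} (l : List α) (f : α → Int) (m : Int) :
    (0 < l.foldl (fun m s => max m (f s)) m) ↔ (0 < m ∨ ∃ s ∈ l, 0 < f s) := by
  induction l generalizing m with
  | nil => simp
  | cons a t ih =>
    simp only [List.foldl_cons, ih, List.mem_cons]
    constructor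
    · rintro (h | ⟨s, hs, h⟩)
      · rcases lt_max_iff.mp h with h | h
        · exact Or.inl h
        · exact Or.inr ⟨a, Or.inl rfl, h⟩
      · exact Or.inr ⟨s, Or.inr hs, h⟩
    · rintro (h | ⟨s, rfl | hs, h⟩)
      · exact Or.inl (lt_max_iff.mpr (Or.inl h))
      · exact Or.inl (lt_max_iff.mpr (Or.inr h))
      · exact Or.inr ⟨s, hs, h⟩

-- A's admission test (max similarity positive) equals B's (neighbors meet the seed union)
theorem cond_eq (seed : List Int) (adj : PySem.Dict Int (List Int)) (node : Int) :
    (decide (0 < (pvA_best seed adj node).1)) =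
      !(PySem.Set.isdisjoint (pvB_seed_nbrs adj seed) (adj.getD node [])) := by
  rw [Bool.eq_iff_iff]
  simp only [decide_eq_true_eq, Bool.not_eq_true', pvA_best_fst, foldl_max_pos]
  constructor
  · rintro (h | ⟨s, hs, h⟩)
    · omega
    · simp only [PySem.Set.len, Int.natCast_pos, List.length_pos_iff_exists_mem] at h
      obtain ⟨x, hx⟩ := h
      rw [PySem.Set.mem_inter] at hx
      simp only [PySem.Set.mem_ofList, get_neighbors] at hx
      rw [Bool.eq_false_iff]
      intro hdisj
      rw [PySem.Set.isdisjoint_iff] at hdisj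
      exact hdisj x ((mem_pvB_seed_nbrs adj seed x).mpr ⟨s, hs, hx.1⟩) hx.2
  · intro h
    have hx : ∃ x ∈ pvB_seed_nbrs adj seed, x ∈ adj.getD node [] := by
      by_contra hcon
      push Not at hcon
      rw [(PySem.Set.isdisjoint_iff _ _).mpr hcon] at h
      simp at h
    obtain ⟨x, hxu, hxn⟩ := hx
    obtain ⟨s, hs, hxs⟩ := (mem_pvB_seed_nbrs adj seed x).mp hxu
    refine Or.inr ⟨s, hs, ?_⟩
    have hmem : x ∈ PySem.Set.inter (PySem.Set.ofList (get_neighbors s adj))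
        (PySem.Set.ofList (get_neighbors node adj)) := by
      rw [PySem.Set.mem_inter]
      simp only [PySem.Set.mem_ofList, get_neighbors]
      exact ⟨hxs, hxn⟩
    simp only [PySem.Set.len, Int.natCast_pos]
    exact List.length_pos_of_mem hmem

-- inserting at an already-present key commutes with an insert at another key
theorem insert_comm_of_contains {κ ν : Type} [BEq κ] [LawfulBEq κ]
    (d : PySem.Dict κ ν) (k q : κ) (v : ν) (w : ν)
    (h : d.contains k = true) (hne : q ≠ k) :
    (d.insert q w).insert k v = (d.insert k v).insert q w := by
  apply PySem.Dict.ext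
  have hk' : (d.insert q w).contains k = true := by
    rw [PySem.Dict.contains_insert]; simp [h]
  by_cases hq : d.contains q = true
  · have hq' : (d.insert k v).contains q = true := by
      rw [PySem.Dict.contains_insert]; simp [hq]
    rw [PySem.Dict.items_insert_of_contains _ _ hk',
        PySem.Dict.items_insert_of_contains _ _ hq,
        PySem.Dict.items_insert_of_contains _ _ hq',
        PySem.Dict.items_insert_of_contains _ _ h]
    rw [List.map_map, List.map_map]
    apply List.map_congr_left
    intro p _
    simp only [Function.comp_apply]
    by_cases h1 : p.1 = q
    · simp [h1, hne, beq_iff_eq]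
    · by_cases h2 : p.1 = k <;> simp [h1, h2, Ne.symm hne, beq_iff_eq]
  · have hq0 : d.contains q = false := by simpa using hq
    have hq' : (d.insert k v).contains q = false := by
      rw [PySem.Dict.contains_insert]; simp [hq0, hne]
    rw [PySem.Dict.items_insert_of_contains _ _ hk',
        PySem.Dict.items_insert_of_not_contains _ _ hq0,
        PySem.Dict.items_insert_of_not_contains _ _ hq',
        PySem.Dict.items_insert_of_contains _ _ h]
    rw [List.map_append]
    simp [Ne.symm hne, beq_iff_eq]
    exact hne

-- re-inserting the stored value changes nothing (keys unique)
theorem insert_getD_self {κ ν : Type} [BEq κ] [LawfulBEq κ]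
    (d : PySem.Dict κ ν) (k : κ) (d0 : ν)
    (h : d.contains k = true) (hnd : d.keys.Nodup) :
    d.insert k (d.getD k d0) = d := by
  apply PySem.Dict.ext
  rw [PySem.Dict.items_insert_of_contains _ _ h]
  conv_rhs => rw [← List.map_id d.items]
  apply List.map_congr_left
  intro p hp
  by_cases h1 : p.1 = k
  · have := PySem.Dict.getD_of_mem_items (k := p.1) (v := p.2) (d := d) (by simpa using hp) hnd (d0 := d0)
    simp [h1]
    rw [← h1, this]
  · simp [h1, beq_iff_eq]

-- a conditional-add fold from a set is Set.update with the filtered list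
theorem foldl_addIf (nodes : List Int) (cond : Int → Prop) [DecidablePred cond] (s : PySem.Set Int) :
    nodes.foldl (fun s n => if cond n then PySem.Set.add s n else s) s =
      PySem.Set.update s (nodes.filter (fun n => decide (cond n))) := by
  induction nodes generalizing s with
  | nil => simp [PySem.Set.update]
  | cons a t ih =>
    by_cases h : cond a
    · simp [h, ih, PySem.Set.update_cons]
    · simp [h, ih]

-- A's per-node-type fill loop collapses to one insert of the accumulated set
theorem fill_nodes_eq (cond : Int → Prop) [DecidablePred cond] (nt : String) :
    ∀ (nodes : List Int) (c : PySem.Dict String (PySem.Set Int)),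
    c.contains nt = true → c.keys.Nodup →
    nodes.foldl (fun c node => if cond node then
        c.modify nt PySem.Set.empty (fun s => PySem.Set.add s node) else c) c
      = c.insert nt (nodes.foldl (fun s node => if cond node then PySem.Set.add s node else s)
          (c.getD nt PySem.Set.empty)) := by
  intro nodes
  induction nodes with
  | nil =>
    intro c hc hnd
    exact (insert_getD_self c nt PySem.Set.empty hc hnd).symm
  | cons a t ih =>
    intro c hc hnd
    by_cases h : cond a
    · simp only [List.foldl_cons, if_pos h]
      have hmod : c.modify nt PySem.Set.empty (fun s => PySem.Set.add s a)
          = c.insert nt (PySem.Set.add (c.getD nt PySem.Set.empty) a) := rfl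
      rw [hmod, ih _ (by rw [PySem.Dict.contains_insert]; simp) (PySem.Dict.nodup_keys_insert _ _ _ hnd),
          PySem.Dict.getD_insert_self, PySem.Dict.insert_insert_self]
    · simp only [List.foldl_cons, if_neg h]
      exact ih c hc hnd

-- the init loop does not touch keys it does not insert
theorem init_getD (cnt : String) (k : String) (d0 : PySem.Set Int) :
    ∀ (items : List (String × List Int)) (c : PySem.Dict String (PySem.Set Int)),
    (∀ p ∈ items, p.1 ≠ k) →
    (items.foldl (fun c p => if p.1 ≠ cnt then c.insert p.1 PySem.Set.empty else c) c).getD k d0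
      = c.getD k d0 := by
  intro items
  induction items with
  | nil => intro c _; rfl
  | cons p t ih =>
    intro c hk
    simp only [List.foldl_cons]
    by_cases h : p.1 ≠ cnt
    · rw [if_pos h, ih _ (fun q hq => hk q (List.mem_cons_of_mem _ hq)),
        PySem.Dict.getD_insert_of_ne _ _ _ (Ne.symm (hk p (List.mem_cons_self)))]
    · rw [if_neg h]
      exact ih _ (fun q hq => hk q (List.mem_cons_of_mem _ hq))

theorem init_contains (cnt : String) (k : String) :
    ∀ (items : List (String × List Int)) (c : PySem.Dict String (PySem.Set Int)),
    (∀ p ∈ items, p.1 ≠ k) →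
    (items.foldl (fun c p => if p.1 ≠ cnt then c.insert p.1 PySem.Set.empty else c) c).contains k
      = c.contains k := by
  intro items
  induction items with
  | nil => intro c _; rfl
  | cons p t ih =>
    intro c hk
    simp only [List.foldl_cons]
    by_cases h : p.1 ≠ cnt
    · rw [if_pos h, ih _ (fun q hq => hk q (List.mem_cons_of_mem _ hq)),
        PySem.Dict.contains_insert]
      simp [Ne.symm (hk p (List.mem_cons_self))]
    · rw [if_neg h]
      exact ih _ (fun q hq => hk q (List.mem_cons_of_mem _ hq))

theorem init_nodup (cnt : String) :
    ∀ (items : List (String × List Int)) (c : PySem.Dict String (PySem.Set Int)),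
    c.keys.Nodup →
    (items.foldl (fun c p => if p.1 ≠ cnt then c.insert p.1 PySem.Set.empty else c) c).keys.Nodup := by
  intro items
  induction items with
  | nil => intro c h; exact h
  | cons p t ih =>
    intro c hc
    simp only [List.foldl_cons]
    by_cases h : p.1 ≠ cnt
    · rw [if_pos h]; exact ih _ (PySem.Dict.nodup_keys_insert _ _ _ hc)
    · rw [if_neg h]; exact ih _ hc

-- an insert at a key already present commutes past the whole init loop
theorem init_insert_comm (cnt : String) (k : String) (v : PySem.Set Int) :
    ∀ (items : List (String × List Int)) (c : PySem.Dict String (PySem.Set Int)),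
    c.contains k = true → (∀ p ∈ items, p.1 ≠ k) →
    (items.foldl (fun c p => if p.1 ≠ cnt then c.insert p.1 PySem.Set.empty else c) c).insert k v
      = items.foldl (fun c p => if p.1 ≠ cnt then c.insert p.1 PySem.Set.empty else c) (c.insert k v) := by
  intro items
  induction items with
  | nil => intro c _ _; rfl
  | cons p t ih =>
    intro c hc hk
    simp only [List.foldl_cons]
    by_cases h : p.1 ≠ cnt
    · rw [if_pos h, ih _ (by rw [PySem.Dict.contains_insert]; simp [hc]) (fun q hq => hk q (List.mem_cons_of_mem _ hq)),
        insert_comm_of_contains _ _ _ _ _ hc (hk p (List.mem_cons_self)), if_pos h]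
    · rw [if_neg h]
      rw [ih _ hc (fun q hq => hk q (List.mem_cons_of_mem _ hq)), if_neg h]

-- main loop correspondence: A's init-then-fill equals B's single insert pass
theorem main_fold (cnt : String) (cond : Int → Prop) [DecidablePred cond] :
    ∀ (items : List (String × List Int)) (c : PySem.Dict String (PySem.Set Int)),
    (items.map Prod.fst).Nodup → c.keys.Nodup →
    (∀ p ∈ items, p.1 ≠ cnt → c.contains p.1 = false) →
    items.foldl (fun c p =>
        if p.1 = cnt then c
        else p.2.foldl (fun c node => if cond node then
            c.modify p.1 PySem.Set.empty (fun s => PySem.Set.add s node) else c) c)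
      (items.foldl (fun c p => if p.1 ≠ cnt then c.insert p.1 PySem.Set.empty else c) c)
    = items.foldl (fun c p =>
        if p.1 = cnt then c
        else c.insert p.1 (PySem.Set.ofList (p.2.filter (fun n => decide (cond n))))) c := by
  intro items
  induction items with
  | nil => intro c _ _ _; rfl
  | cons p t ih =>
    intro c hnd hcnd hfresh
    rw [List.map_cons] at hnd
    have hnd' : (t.map Prod.fst).Nodup := (List.nodup_cons.mp hnd).2
    have hp_not : p.1 ∉ t.map Prod.fst := (List.nodup_cons.mp hnd).1
    by_cases hp : p.1 = cnt
    · simp only [List.foldl_cons, if_pos hp, if_neg (by simp [hp] : ¬ p.1 ≠ cnt)]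
      exact ih c hnd' hcnd (fun q hq => hfresh q (List.mem_cons_of_mem _ hq))
    · simp only [List.foldl_cons, if_neg hp, if_pos (by simp [hp] : p.1 ≠ cnt)]
      set c1 := c.insert p.1 PySem.Set.empty with hc1
      have hc1k : c1.contains p.1 = true := by
        rw [hc1, PySem.Dict.contains_insert]; simp
      have htk : ∀ q ∈ t, q.1 ≠ p.1 := by
        intro q hq hqe
        exact hp_not (hqe ▸ List.mem_map_of_mem hq)
      have hIcont : (t.foldl (fun c p => if p.1 ≠ cnt then c.insert p.1 PySem.Set.empty else c) c1).contains p.1 = true := by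
        rw [init_contains cnt p.1 t c1 htk]; exact hc1k
      have hInodup : (t.foldl (fun c p => if p.1 ≠ cnt then c.insert p.1 PySem.Set.empty else c) c1).keys.Nodup :=
        init_nodup cnt t c1 (PySem.Dict.nodup_keys_insert _ _ _ hcnd)
      rw [fill_nodes_eq cond p.1 p.2 _ hIcont hInodup]
      rw [init_getD cnt p.1 PySem.Set.empty t c1 htk]
      rw [hc1, PySem.Dict.getD_insert_self]
      rw [foldl_addIf]
      rw [show (PySem.Set.empty : PySem.Set Int).update (List.filter (fun n => decide (cond n)) p.2)
            = PySem.Set.ofList (List.filter (fun n => decide (cond n)) p.2) from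
          PySem.Set.update_nil_left _]
      rw [init_insert_comm cnt p.1 _ t c1 hc1k htk]
      rw [hc1, PySem.Dict.insert_insert_self]
      apply ih _ hnd' (PySem.Dict.nodup_keys_insert _ _ _ hcnd)
      intro q hq hqcnt
      rw [PySem.Dict.contains_insert]
      simp [htk q hq, hfresh q (List.mem_cons_of_mem _ hq) hqcnt]

-- the per-seed communities agree
theorem community_eq (hgd : PySem.Dict String (List Int)) (adj : PySem.Dict Int (List Int))
    (cnt : String) (seed : List Int) (hnd : hgd.keys.Nodup) :
    pvA_community hgd adj cnt seed = pvB_community hgd adj cnt seed := by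
  unfold pvA_community pvB_community
  simp only []
  have hkeys : hgd.keys.foldl (fun c node_type =>
      if node_type ≠ cnt then c.insert node_type PySem.Set.empty else c)
      (PySem.Dict.empty.insert cnt (PySem.Set.ofList seed))
      = hgd.items.foldl (fun c p => if p.1 ≠ cnt then c.insert p.1 PySem.Set.empty else c)
        (PySem.Dict.empty.insert cnt (PySem.Set.ofList seed)) := by
    have : hgd.keys = hgd.items.map Prod.fst := rfl
    rw [this, List.foldl_map]
  rw [hkeys]
  have hbase_nodup : (PySem.Dict.empty.insert cnt (PySem.Set.ofList seed)
      : PySem.Dict String (PySem.Set Int)).keys.Nodup :=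
    PySem.Dict.nodup_keys_insert _ _ _ (by simp [PySem.Dict.keys, PySem.Dict.empty])
  have hfresh : ∀ p ∈ hgd.items, p.1 ≠ cnt →
      (PySem.Dict.empty.insert cnt (PySem.Set.ofList seed)
        : PySem.Dict String (PySem.Set Int)).contains p.1 = false := by
    intro p _ hp
    rw [PySem.Dict.contains_insert]
    simp [hp, PySem.Dict.contains_empty]
  have hitems_nodup : (hgd.items.map Prod.fst).Nodup := hnd
  rw [main_fold cnt (fun node => 0 < (pvA_best seed adj node).1) hgd.items _ hitems_nodup hbase_nodup hfresh]
  have hfun : (fun n => decide (0 < (pvA_best seed adj n).1))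
      = (fun n => !(PySem.Set.isdisjoint (pvB_seed_nbrs adj seed) (adj.getD n []))) :=
    funext (cond_eq seed adj)
  rw [hfun]

-- an append-fold is a map
theorem foldl_append_map {α β : Type} (l : List α) (f : α → β) :
    ∀ a0 : List β, l.foldl (fun acc x => acc ++ [f x]) a0 = a0 ++ l.map f := by
  induction l with
  | nil => intro a0; simp
  | cons a t ih => intro a0; simp [ih]

-- ===== VERDICT (by name: the statement is the Claim_ definition above) =====
theorem seed_expansion_spec : Claim_equal_seed_expansion := by
  intro hg sc cnt adj _
  unfold Spec_seed_expansion seed_expansion seed_expansion_alt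
  rw [foldl_append_map]
  rw [List.nil_append]
  apply List.map_congr_left
  intro seed _
  rw [community_eq _ _ _ _ (PySem.Dict.nodup_keys_ofList hg)]
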